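-- pv_equiv track=rewrite | github.com/gusprompt/gig-portable | GIG/_internal/filtro/app.py | group_contiguous_page_indexes
-- ===== SOURCE A (Python) =====
-- def group_contiguous_page_indexes(page_indexes: list[int]) -> list[list[int]]:
--     normalized = sorted({int(page_index) for page_index in page_indexes if int(page_index) >= 0})
--     if not normalized:
--         return []
--
--     groups: list[list[int]] = []
--     current_group = [normalized[0]]
--     for page_index in normalized[1:]:
--         if page_index == current_group[-1] + 1:
--             current_group.append(page_index)
--             continue
--         groups.append(current_group)
--         current_group = [page_index]
--     groups.append(current_group)
--     return groups
-- ===== SOURCE B (Python) =====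
-- def group_contiguous_page_indexes(page_indexes: list[int]) -> list[list[int]]:
--     normalized = sorted({int(page_index) for page_index in page_indexes if int(page_index) >= 0})
--     groups: list[list[int]] = []
--     for value in reversed(normalized):
--         if groups and groups[0][0] == value + 1:
--             groups[0].insert(0, value)
--         else:
--             groups.insert(0, [value])
--     return groups
-- ===== Notes on version B (the rewrite author's own statement) =====
-- stated objective: alternative
-- what changed: B builds the runs back-to-front: it folds over the reversed normalized list and prepends each value to the leading run when contiguous, eliminating A's current_group accumulator and the final flush append.
import Mathlib
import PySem

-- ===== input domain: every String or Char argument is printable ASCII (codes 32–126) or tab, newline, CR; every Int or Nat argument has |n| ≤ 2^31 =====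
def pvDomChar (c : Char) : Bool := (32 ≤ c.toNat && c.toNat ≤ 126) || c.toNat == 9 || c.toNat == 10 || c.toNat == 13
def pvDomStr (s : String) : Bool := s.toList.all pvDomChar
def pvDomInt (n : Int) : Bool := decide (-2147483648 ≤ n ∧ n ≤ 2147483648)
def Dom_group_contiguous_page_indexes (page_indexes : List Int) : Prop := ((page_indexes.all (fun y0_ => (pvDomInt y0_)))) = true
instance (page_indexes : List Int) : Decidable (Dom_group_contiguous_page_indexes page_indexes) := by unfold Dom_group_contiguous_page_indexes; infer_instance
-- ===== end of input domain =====

-- B builds the runs back-to-front (fold over the reversed normalized list, prepending to the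
-- leading run when contiguous) instead of A's forward loop with a current_group accumulator
-- and final flush; a different decomposition, with no speed claim (front-insertion costs more on large inputs).


-- ===== PORT A =====
-- A's for-loop over normalized[1:] with state (groups, current_group); the [] case is the
-- trailing groups.append(current_group).
def pvLoopA : List Int → List (List Int) → List Int → List (List Int)
  | [], groups, cur => groups ++ [cur]
  | p :: rest, groups, cur =>
      if p = (PySem.List.pyGet? cur (-1)).getD 0 + 1 then
        pvLoopA rest groups (cur ++ [p])
      else
        pvLoopA rest (groups ++ [cur]) [p]

def group_contiguous_page_indexes (page_indexes : List Int) : List (List Int) :=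
  let normalized :=
    PySem.List.sorted (PySem.Set.ofList (page_indexes.filter (fun p => decide (0 ≤ p))))
      (fun x => x) false
  match normalized with
  | [] => []
  | h :: t => pvLoopA t [] [h]

-- ===== PORT B =====
-- one step of B's loop body: prepend v to the leading run if contiguous, else open a new run
def pvStepB (groups : List (List Int)) (v : Int) : List (List Int) :=
  match groups with
  | [] => [[v]]
  | g :: gs =>
      if (PySem.List.pyGet? g 0).getD 0 = v + 1 then (v :: g) :: gs else [v] :: g :: gs

def group_contiguous_page_indexes_alt (page_indexes : List Int) : List (List Int) :=
  let normalized :=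
    PySem.List.sorted (PySem.Set.ofList (page_indexes.filter (fun p => decide (0 ≤ p))))
      (fun x => x) false
  normalized.reverse.foldl pvStepB []

-- ===== PRECONDITION & SPEC =====
def Spec_group_contiguous_page_indexes (page_indexes : List Int) (out : List (List Int)) : Prop := out = group_contiguous_page_indexes_alt page_indexes
instance (page_indexes : List Int) (out : List (List Int)) : Decidable (Spec_group_contiguous_page_indexes page_indexes out) := by unfold Spec_group_contiguous_page_indexes; infer_instance

-- ===== CLAIM (what is proved, stated in full; the proofs are below) =====
def Claim_equal_group_contiguous_page_indexes : Prop := ∀ (page_indexes : List Int), Dom_group_contiguous_page_indexes page_indexes → Spec_group_contiguous_page_indexes page_indexes (group_contiguous_page_indexes page_indexes)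

-- ===== LEMMAS AND PROOFS =====

-- B's loop as a foldr (fold over the reversed list = foldr)
def pvChunks (l : List Int) : List (List Int) :=
  l.foldr (fun v acc => pvStepB acc v) []

lemma pvLast_append (cur : List Int) (p : Int) :
    (PySem.List.pyGet? (cur ++ [p]) (-1)).getD 0 = p := by
  simp [PySem.List.pyGet?, PySem.List.pyIdx?]

lemma pvHead_get (v : Int) (g : List Int) :
    (PySem.List.pyGet? (v :: g) 0).getD 0 = v := by
  simp [PySem.List.pyGet?, PySem.List.pyIdx?]

-- how A's run-in-progress `cur` merges with the chunks of the remaining list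
def pvMerge (cur : List Int) (cs : List (List Int)) : List (List Int) :=
  match cs with
  | [] => [cur]
  | g :: gs =>
      if (PySem.List.pyGet? g 0).getD 0 = (PySem.List.pyGet? cur (-1)).getD 0 + 1 then
        (cur ++ g) :: gs
      else
        cur :: g :: gs

-- one unfolding of A's loop matched against pvChunks/pvMerge
lemma pvMerge_step (p : Int) (rest : List Int) (cur : List Int) :
    pvMerge cur (pvChunks (p :: rest)) =
      if p = (PySem.List.pyGet? cur (-1)).getD 0 + 1 then
        pvMerge (cur ++ [p]) (pvChunks rest)
      else
        cur :: pvMerge [p] (pvChunks rest) := by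
  rw [show pvChunks (p :: rest) = pvStepB (pvChunks rest) p from rfl]
  cases hr : pvChunks rest with
  | nil =>
      simp only [pvStepB, pvMerge, pvHead_get]
  | cons g gs =>
      have hl1 : (PySem.List.pyGet? [p] (-1)).getD 0 = p := by
        simp [PySem.List.pyGet?, PySem.List.pyIdx?]
      by_cases hc' : (PySem.List.pyGet? g 0).getD 0 = p + 1
      · simp only [pvStepB, if_pos hc', pvMerge, pvHead_get, pvLast_append, hl1]
        split_ifs <;> simp
      · simp only [pvStepB, if_neg hc', pvMerge, pvHead_get, pvLast_append, hl1]

-- main invariant of A's loop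
lemma pvLoopA_eq (l : List Int) :
    ∀ (groups : List (List Int)) (cur : List Int),
      pvLoopA l groups cur = groups ++ pvMerge cur (pvChunks l) := by
  induction l with
  | nil => intro groups cur; simp [pvLoopA, pvChunks, pvMerge]
  | cons p rest ih =>
      intro groups cur
      rw [pvMerge_step]
      unfold pvLoopA
      by_cases hc : p = (PySem.List.pyGet? cur (-1)).getD 0 + 1
      · rw [if_pos hc, if_pos hc, ih]
      · rw [if_neg hc, if_neg hc, ih]
        simp

-- B's foldl over the reversed list is the foldr pvChunks
lemma pvAlt_eq_chunks (l : List Int) :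
    l.reverse.foldl pvStepB [] = pvChunks l := by
  rw [List.foldl_reverse]; rfl

-- starting the loop with cur = [h] gives exactly one more step of pvChunks
lemma pvMerge_singleton (h : Int) (l : List Int) :
    pvMerge [h] (pvChunks l) = pvStepB (pvChunks l) h := by
  cases hr : pvChunks l with
  | nil => simp [pvMerge, pvStepB]
  | cons g gs =>
      unfold pvMerge pvStepB
      have hl : (PySem.List.pyGet? [h] (-1)).getD 0 = h := by
        simp [PySem.List.pyGet?, PySem.List.pyIdx?]
      rw [hl]
      by_cases hc : (PySem.List.pyGet? g 0).getD 0 = h + 1 <;> simp [hc]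

-- ===== VERDICT (by name: the statement is the Claim_ definition above) =====
theorem group_contiguous_page_indexes_spec : Claim_equal_group_contiguous_page_indexes := by
  intro page_indexes _
  unfold Spec_group_contiguous_page_indexes
  unfold group_contiguous_page_indexes group_contiguous_page_indexes_alt
  simp only [pvAlt_eq_chunks]
  cases hN : PySem.List.sorted (PySem.Set.ofList (page_indexes.filter (fun p => decide (0 ≤ p))))
      (fun x => x) false with
  | nil => rfl
  | cons h t =>
      show pvLoopA t [] [h] = pvChunks (h :: t)
      rw [pvLoopA_eq, List.nil_append, pvMerge_singleton]
      rfl
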